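-- pv_equiv track=rewrite | github.com/cirosantilli/project-euler-solvers | solvers/153.py | _grouped_sum_linear_times_floor
-- ===== SOURCE A (Python) =====
-- def _grouped_sum_linear_times_floor(n: int) -> int:
--     """
--     Returns sum_{k=1..n} k * floor(n/k) in O(sqrt(n)) time by grouping equal quotients.
--     """
--     if n <= 0:
--         return 0
--     total = 0
--     k = 1
--     while k <= n:
--         q = n // k
--         k2 = n // q  # largest index with same quotient q
--         # sum_{t=k..k2} t = (k + k2) * (k2 - k + 1) // 2
--         total += q * (k + k2) * (k2 - k + 1) // 2
--         k = k2 + 1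
--     return total
-- ===== SOURCE B (Python) =====
-- def _grouped_sum_linear_times_floor(n: int) -> int:
--     """
--     Returns sum_{k=1..n} k * floor(n/k) via the Dirichlet hyperbola method:
--     counting lattice points (d, q) with d*q <= n weighted by d, split at r = isqrt(n).
--     """
--     r = 0
--     while (r + 1) * (r + 1) <= n:
--         r += 1
--     total = 0
--     for i in range(1, r + 1):
--         q = n // i
--         total += i * q + q * (q + 1) // 2
--     return total - r * (r + 1) // 2 * r
-- ===== Notes on version B (the rewrite author's own statement) =====
-- stated objective: alternative
-- what changed: Replaced A's equal-quotient block-jumping loop (iterating k, jumping to k2=n//(n//k) and adding a per-block triangular formula) by the Dirichlet hyperbola method: a hand-rolled integer-sqrt loop followed by a single pass i=1..isqrt(n) accumulating i*(n//i) + T(n//i), minus the overcount r*T(r).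
import Mathlib
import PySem

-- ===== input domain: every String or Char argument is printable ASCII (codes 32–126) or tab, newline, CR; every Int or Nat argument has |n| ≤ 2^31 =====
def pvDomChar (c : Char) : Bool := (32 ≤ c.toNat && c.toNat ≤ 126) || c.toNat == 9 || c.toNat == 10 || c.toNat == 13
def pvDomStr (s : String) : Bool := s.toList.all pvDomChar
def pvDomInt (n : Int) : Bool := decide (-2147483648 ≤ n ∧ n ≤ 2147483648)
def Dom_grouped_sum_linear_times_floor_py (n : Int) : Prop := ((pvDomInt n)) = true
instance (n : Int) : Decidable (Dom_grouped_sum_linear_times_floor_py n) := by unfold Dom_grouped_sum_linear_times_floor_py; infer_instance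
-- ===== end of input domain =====

-- B replaces A's equal-quotient block-jumping loop by the Dirichlet hyperbola method
-- (isqrt loop, then one pass i = 1..isqrt(n)); a different O(sqrt n) algorithm, same values.

-- ===== PORT A =====
-- fuel bounds the iteration count only (the loop runs at most n times since k strictly increases)
def pvALoop : Nat → Int → Int → Int → Int
  | 0, _, _, total => total
  | fuel+1, n, k, total =>
    if k ≤ n then
      let q := PySem.Int.floordiv n k
      let k2 := PySem.Int.floordiv n q
      pvALoop fuel n (k2 + 1) (total + PySem.Int.floordiv (q * (k + k2) * (k2 - k + 1)) 2)
    else total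

def grouped_sum_linear_times_floor_py (n : Int) : Int :=
  if n ≤ 0 then 0 else pvALoop n.toNat n 1 0

-- ===== PORT B =====
-- 'while (r+1)*(r+1) <= n: r += 1'; fuel bounds the iteration count only (r grows by 1, staying ≤ n)
def pvIsqrtLoop : Nat → Int → Int → Int
  | 0, _, r => r
  | fuel+1, n, r => if (r + 1) * (r + 1) ≤ n then pvIsqrtLoop fuel n (r + 1) else r

def grouped_sum_linear_times_floor_py_alt (n : Int) : Int :=
  let r := pvIsqrtLoop n.toNat n 0
  let total := (PySem.List.pyRange 1 (r + 1) 1).foldl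
    (fun total i =>
      total + (i * PySem.Int.floordiv n i +
        PySem.Int.floordiv (PySem.Int.floordiv n i * (PySem.Int.floordiv n i + 1)) 2)) 0
  total - PySem.Int.floordiv (r * (r + 1)) 2 * r

-- ===== PRECONDITION & SPEC =====
def Spec_grouped_sum_linear_times_floor_py (n : Int) (out : Int) : Prop := out = grouped_sum_linear_times_floor_py_alt n
instance (n : Int) (out : Int) : Decidable (Spec_grouped_sum_linear_times_floor_py n out) := by unfold Spec_grouped_sum_linear_times_floor_py; infer_instance

-- ===== CLAIM (what is proved, stated in full; the proofs are below) =====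
def Claim_equal_grouped_sum_linear_times_floor_py : Prop := ∀ (n : Int), Dom_grouped_sum_linear_times_floor_py n → Spec_grouped_sum_linear_times_floor_py n (grouped_sum_linear_times_floor_py n)

-- ===== LEMMAS AND PROOFS =====

-- ---------- A-side characterisation: A computes the linear sum Σ_{t=1..n} t*(n//t) ----------

lemma pv_sum_range_linear (m : Nat) (a q : Int) :
    ((List.range m).map (fun j : Nat => (a + (j : Int)) * q)).sum * 2 = q * (a + (a + m - 1)) * m := by
  induction m with
  | zero => simp
  | succ m ih =>
    rw [List.range_succ, List.map_append, List.sum_append]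
    simp only [List.map_cons, List.map_nil, List.sum_cons, List.sum_nil]
    push_cast
    push_cast at ih
    linear_combination ih

lemma pv_block_sum (q k k2 : Int) (hk : k ≤ k2 + 1) :
    PySem.Int.floordiv (q * (k + k2) * (k2 - k + 1)) 2
      = ((PySem.List.pyRange k (k2 + 1) 1).map (fun t => t * q)).sum := by
  rw [PySem.List.pyRange_one, List.map_map, PySem.Int.floordiv_eq_ediv_of_pos (by norm_num)]
  have h := pv_sum_range_linear (k2 + 1 - k).toNat k q
  have hm : ((k2 + 1 - k).toNat : Int) = k2 + 1 - k := by omega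
  rw [hm] at h
  have hc : (List.range (k2 + 1 - k).toNat).map ((fun t => t * q) ∘ fun j : Nat => k + (j : Int))
      = (List.range (k2 + 1 - k).toNat).map (fun j : Nat => (k + (j : Int)) * q) := by
    simp [Function.comp]
  rw [hc]
  have h2 : q * (k + k2) * (k2 - k + 1)
      = ((List.range (k2 + 1 - k).toNat).map (fun j : Nat => (k + (j : Int)) * q)).sum * 2 := by
    rw [h]; ring
  rw [h2]
  omega

lemma pv_quot_const (n k t q : Int) (_hn : 0 < n) (hk : 1 ≤ k) (hkn : k ≤ n) (hkt : k ≤ t)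
    (hq : q = n / k) (ht : t ≤ n / q) : n / t = q := by
  have hq1 : 1 ≤ q := by
    rw [hq, Int.le_ediv_iff_mul_le (by omega)]; omega
  have ht0 : 0 < t := by omega
  have h1 : q ≤ n / t := by
    rw [Int.le_ediv_iff_mul_le ht0]
    have := (Int.le_ediv_iff_mul_le hq1).mp ht
    nlinarith
  have h2 : n / t < q + 1 := by
    rw [Int.ediv_lt_iff_lt_mul ht0]
    have hnk : n < (q + 1) * k := by
      have h := Int.emod_lt_of_pos n (show (0:Int) < k by omega)
      have h' := Int.mul_ediv_add_emod n k
      rw [hq]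
      nlinarith
    nlinarith
  omega

lemma pv_aloop_eq (fuel : Nat) : ∀ (n k total : Int), 0 < n → 1 ≤ k →
    (n + 1 - k).toNat ≤ fuel →
    pvALoop fuel n k total
      = total + ((PySem.List.pyRange k (n + 1) 1).map (fun t => t * PySem.Int.floordiv n t)).sum := by
  induction fuel with
  | zero =>
    intro n k total hn hk hf
    rw [PySem.List.pyRange_one_eq_nil (by omega)]
    simp [pvALoop]
  | succ fuel ih =>
    intro n k total hn hk hf
    by_cases hkn : k ≤ n
    · have hq1 : 1 ≤ n / k := by rw [Int.le_ediv_iff_mul_le (by omega)]; omega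
      have hfd1 : PySem.Int.floordiv n k = n / k :=
        PySem.Int.floordiv_eq_ediv_of_pos (by omega)
      have hfd2 : PySem.Int.floordiv n (n / k) = n / (n / k) :=
        PySem.Int.floordiv_eq_ediv_of_pos (by omega)
      set q := n / k with hqdef
      set k2 := n / q with hk2def
      have hkk2 : k ≤ k2 := by
        rw [hk2def, Int.le_ediv_iff_mul_le (by omega)]
        have h := Int.mul_ediv_add_emod n k
        have h2 := Int.emod_nonneg n (show (k:Int) ≠ 0 by omega)
        nlinarith
      have hk2n : k2 ≤ n := by
        rw [hk2def]; exact Int.le_trans (Int.ediv_le_self _ (by omega)) (le_refl n)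
      have hstep : pvALoop (fuel + 1) n k total
          = pvALoop fuel n (k2 + 1)
              (total + PySem.Int.floordiv (q * (k + k2) * (k2 - k + 1)) 2) := by
        simp only [pvALoop, if_pos hkn, hfd1, hfd2]
      rw [hstep, ih n (k2 + 1) _ hn (by omega) (by omega)]
      rw [PySem.List.pyRange_one_append k (k2 + 1) (n + 1) (by omega) (by omega),
          List.map_append, List.sum_append]
      have hcong : (PySem.List.pyRange k (k2 + 1) 1).map (fun t => t * PySem.Int.floordiv n t)
          = (PySem.List.pyRange k (k2 + 1) 1).map (fun t => t * q) := by
        apply List.map_congr_left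
        intro t htmem
        have hb := (PySem.List.mem_pyRange_one).mp htmem
        have huq : n / t = q := pv_quot_const n k t q hn hk hkn hb.1 hqdef (by omega)
        rw [PySem.Int.floordiv_eq_ediv_of_pos (by omega), huq]
      rw [hcong, pv_block_sum q k k2 (by omega)]
      ring
    · rw [PySem.List.pyRange_one_eq_nil (by omega)]
      simp only [pvALoop, if_neg hkn]
      simp

-- ---------- Nat-level hyperbola identity ----------

lemma pv_tri (m : Nat) : 2 * (∑ d ∈ Finset.Ioc 0 m, d) = m * (m + 1) := by
  induction m with
  | zero => simp
  | succ m ih =>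
    rw [Finset.sum_Ioc_succ_top (Nat.zero_le _)]
    ring_nf
    ring_nf at ih
    omega

lemma pv_filt (n p : Nat) (hp : 0 < p) :
    (Finset.Ioc 0 n).filter (fun x => p * x ≤ n) = Finset.Ioc 0 (n / p) := by
  ext x
  simp only [Finset.mem_filter, Finset.mem_Ioc]
  constructor
  · rintro ⟨⟨h0, _⟩, hpx⟩
    exact ⟨h0, (Nat.le_div_iff_mul_le hp).mpr (by nlinarith)⟩
  · rintro ⟨h0, hx⟩
    have h := (Nat.le_div_iff_mul_le hp).mp hx
    exact ⟨⟨h0, by nlinarith⟩, by nlinarith⟩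

lemma pv_count (n d : Nat) (hd : 0 < d) :
    (∑ q ∈ Finset.Ioc 0 n, if d * q ≤ n then d else 0) = d * (n / d) := by
  rw [← Finset.sum_filter, pv_filt n d hd, Finset.sum_const, Nat.card_Ioc, smul_eq_mul]
  simp [Nat.mul_comm]

lemma pv_tri_count (n q : Nat) (hq : 0 < q) :
    (∑ d ∈ Finset.Ioc 0 n, if d * q ≤ n then d else 0) = ∑ d ∈ Finset.Ioc 0 (n / q), d := by
  rw [← Finset.sum_filter]
  have h : (Finset.Ioc 0 n).filter (fun d => d * q ≤ n) = Finset.Ioc 0 (n / q) := by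
    rw [← pv_filt n q hq]
    apply Finset.filter_congr
    intro x _
    simp [Nat.mul_comm]
  rw [h]

lemma pv_H_small (n r q : Nat) (_hq : 0 < q) (hqr : q ≤ r) (hrn : r * r ≤ n) :
    (∑ d ∈ Finset.Ioc 0 r, if d * q ≤ n then d else 0) = ∑ d ∈ Finset.Ioc 0 r, d := by
  apply Finset.sum_congr rfl
  intro d hd
  have hb := Finset.mem_Ioc.mp hd
  rw [if_pos (by nlinarith [hb.2])]

lemma pv_H_big (n r q : Nat) (hr : r < q) (hn2 : n < (r + 1) * (r + 1)) :
    (∑ d ∈ Finset.Ioc 0 r, if d * q ≤ n then d else 0) = ∑ d ∈ Finset.Ioc 0 (n / q), d := by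
  rw [← Finset.sum_filter]
  have hq : 0 < q := by omega
  have hnq : n / q ≤ r := by
    have : n / q < r + 1 := (Nat.div_lt_iff_lt_mul hq).mpr (by nlinarith)
    omega
  have h : (Finset.Ioc 0 r).filter (fun d => d * q ≤ n) = Finset.Ioc 0 (n / q) := by
    ext d
    simp only [Finset.mem_filter, Finset.mem_Ioc]
    constructor
    · rintro ⟨⟨h0, _⟩, hdq⟩
      exact ⟨h0, (Nat.le_div_iff_mul_le hq).mpr hdq⟩
    · rintro ⟨h0, hdq⟩
      exact ⟨⟨h0, le_trans hdq hnq⟩, (Nat.le_div_iff_mul_le hq).mp hdq⟩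
  rw [h]

lemma pv_main (n r : Nat) (hn : 0 < n) (h1 : r * r ≤ n) (h2 : n < (r + 1) * (r + 1)) :
    (∑ d ∈ Finset.Ioc 0 n, d * (n / d)) + r * (∑ d ∈ Finset.Ioc 0 r, d)
      = (∑ i ∈ Finset.Ioc 0 r, i * (n / i)) + ∑ i ∈ Finset.Ioc 0 r, (∑ d ∈ Finset.Ioc 0 (n / i), d) := by
  have hr1 : 0 < r := by
    rcases Nat.eq_zero_or_pos r with h | h
    · subst h; simp at h2; omega
    · exact h
  have hrn : r ≤ n := by nlinarith
  -- S: the lattice-point sum Σ_{d,q ∈ (0,n], dq ≤ n} d, rows indexed by d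
  have hA1 : (∑ d ∈ Finset.Ioc 0 n, ∑ q ∈ Finset.Ioc 0 n, if d * q ≤ n then d else 0)
      = ∑ d ∈ Finset.Ioc 0 n, d * (n / d) := by
    apply Finset.sum_congr rfl
    intro d hd
    exact pv_count n d (Finset.mem_Ioc.mp hd).1
  -- split the rows at d = r
  have hA2 : (∑ d ∈ Finset.Ioc 0 r, ∑ q ∈ Finset.Ioc 0 n, if d * q ≤ n then d else 0)
      + (∑ d ∈ Finset.Ioc r n, ∑ q ∈ Finset.Ioc 0 n, if d * q ≤ n then d else 0)
      = ∑ d ∈ Finset.Ioc 0 n, ∑ q ∈ Finset.Ioc 0 n, if d * q ≤ n then d else 0 :=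
    Finset.sum_Ioc_consecutive _ (Nat.zero_le r) hrn
  have hA3 : (∑ d ∈ Finset.Ioc 0 r, ∑ q ∈ Finset.Ioc 0 n, if d * q ≤ n then d else 0)
      = ∑ d ∈ Finset.Ioc 0 r, d * (n / d) := by
    apply Finset.sum_congr rfl
    intro d hd
    exact pv_count n d (Finset.mem_Ioc.mp hd).1
  -- columns: for each q, split at d = r
  have hA5 : ∀ q : Nat,
      (∑ d ∈ Finset.Ioc 0 r, if d * q ≤ n then d else 0)
      + (∑ d ∈ Finset.Ioc r n, if d * q ≤ n then d else 0)
      = ∑ d ∈ Finset.Ioc 0 n, if d * q ≤ n then d else 0 :=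
    fun q => Finset.sum_Ioc_consecutive _ (Nat.zero_le r) hrn
  have hcomm : (∑ d ∈ Finset.Ioc r n, ∑ q ∈ Finset.Ioc 0 n, if d * q ≤ n then d else 0)
      = ∑ q ∈ Finset.Ioc 0 n, ∑ d ∈ Finset.Ioc r n, if d * q ≤ n then d else 0 :=
    Finset.sum_comm
  -- full columns are triangular numbers
  have hG : (∑ q ∈ Finset.Ioc 0 n, ∑ d ∈ Finset.Ioc 0 n, if d * q ≤ n then d else 0)
      = ∑ q ∈ Finset.Ioc 0 n, ∑ d ∈ Finset.Ioc 0 (n / q), d := by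
    apply Finset.sum_congr rfl
    intro q hq
    exact pv_tri_count n q (Finset.mem_Ioc.mp hq).1
  -- truncated columns: Σ_{q ∈ (0,n]} H q, split at q = r
  have hHsplit : ∀ f : Nat → Nat,
      (∑ q ∈ Finset.Ioc 0 r, f q) + (∑ q ∈ Finset.Ioc r n, f q) = ∑ q ∈ Finset.Ioc 0 n, f q :=
    fun f => Finset.sum_Ioc_consecutive _ (Nat.zero_le r) hrn
  have hHlow : (∑ q ∈ Finset.Ioc 0 r, ∑ d ∈ Finset.Ioc 0 r, if d * q ≤ n then d else 0)
      = r * (∑ d ∈ Finset.Ioc 0 r, d) := by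
    rw [Finset.sum_congr rfl (fun q hq => pv_H_small n r q (Finset.mem_Ioc.mp hq).1
          (Finset.mem_Ioc.mp hq).2 h1),
        Finset.sum_const, Nat.card_Ioc, smul_eq_mul]
    simp
  have hHhigh : (∑ q ∈ Finset.Ioc r n, ∑ d ∈ Finset.Ioc 0 r, if d * q ≤ n then d else 0)
      = ∑ q ∈ Finset.Ioc r n, ∑ d ∈ Finset.Ioc 0 (n / q), d := by
    apply Finset.sum_congr rfl
    intro q hq
    exact pv_H_big n r q (Finset.mem_Ioc.mp hq).1 h2
  have hGsplit := hHsplit (fun q => ∑ d ∈ Finset.Ioc 0 (n / q), d)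
  -- combine the per-column splits over q ∈ (0, n]
  have hcols : (∑ q ∈ Finset.Ioc 0 n, ∑ d ∈ Finset.Ioc 0 r, if d * q ≤ n then d else 0)
      + (∑ q ∈ Finset.Ioc 0 n, ∑ d ∈ Finset.Ioc r n, if d * q ≤ n then d else 0)
      = ∑ q ∈ Finset.Ioc 0 n, ∑ d ∈ Finset.Ioc 0 n, if d * q ≤ n then d else 0 := by
    rw [← Finset.sum_add_distrib]
    exact Finset.sum_congr rfl (fun q _ => hA5 q)
  have hH := hHsplit (fun q => ∑ d ∈ Finset.Ioc 0 r, if d * q ≤ n then d else 0)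
  generalize hP : r * (∑ d ∈ Finset.Ioc 0 r, d) = P at hHlow ⊢
  omega

-- ---------- bridges between the Int-level ports and the Nat-level sums ----------

lemma pv_list_range_sum (f : Nat → Int) (m : Nat) :
    ((List.range m).map f).sum = ∑ j ∈ Finset.range m, f j := by
  induction m with
  | zero => simp
  | succ m ih => rw [List.range_succ, List.map_append, List.sum_append, Finset.sum_range_succ]; simp [ih]

lemma pv_range_Ioc (g : Nat → Nat) (m : Nat) :
    (∑ j ∈ Finset.range m, g (j + 1)) = ∑ d ∈ Finset.Ioc 0 m, g d := by
  induction m with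
  | zero => simp
  | succ m ih => rw [Finset.sum_range_succ, Finset.sum_Ioc_succ_top (Nat.zero_le _), ih]

lemma pv_fd_nat (m i : Nat) : PySem.Int.floordiv (m : Int) (i : Int) = ((m / i : Nat) : Int) := by
  exact_mod_cast PySem.Int.floordiv_natCast m i

lemma pv_fd_tri (q : Nat) :
    PySem.Int.floordiv ((q : Int) * ((q : Int) + 1)) 2 = ((∑ d ∈ Finset.Ioc 0 q, d : Nat) : Int) := by
  have h := pv_tri q
  have hc : (q : Int) * ((q : Int) + 1) = 2 * ((∑ d ∈ Finset.Ioc 0 q, d : Nat) : Int) := by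
    exact_mod_cast congrArg (fun x : Nat => (x : Int)) h.symm
  rw [hc, PySem.Int.floordiv_eq_ediv_of_pos (by norm_num), Int.mul_ediv_cancel_left _ (by norm_num)]

lemma pv_linear_cast (m : Nat) :
    ((PySem.List.pyRange 1 ((m : Int) + 1) 1).map (fun t => t * PySem.Int.floordiv (m : Int) t)).sum
      = ((∑ d ∈ Finset.Ioc 0 m, d * (m / d) : Nat) : Int) := by
  rw [PySem.List.pyRange_one, List.map_map]
  have hm : (((m : Int) + 1 - 1).toNat) = m := by omega
  rw [hm, pv_list_range_sum]
  have hterm : ∀ j ∈ Finset.range m,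
      ((fun t => t * PySem.Int.floordiv (m : Int) t) ∘ fun k : Nat => 1 + (k : Int)) j
        = (((j + 1) * (m / (j + 1)) : Nat) : Int) := by
    intro j _
    have h1 : (1 : Int) + (j : Int) = (((j + 1 : Nat)) : Int) := by push_cast; ring
    simp only [Function.comp]
    rw [h1, pv_fd_nat]
    push_cast
    ring
  rw [Finset.sum_congr rfl hterm, ← Nat.cast_sum]
  exact_mod_cast congrArg (fun x : Nat => (x : Int)) (pv_range_Ioc (fun d => d * (m / d)) m)

lemma pv_isqrt (fuel : Nat) : ∀ (n r : Int), 0 ≤ r → r * r ≤ n → (n - r).toNat ≤ fuel →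
    0 ≤ pvIsqrtLoop fuel n r ∧ pvIsqrtLoop fuel n r * pvIsqrtLoop fuel n r ≤ n
      ∧ n < (pvIsqrtLoop fuel n r + 1) * (pvIsqrtLoop fuel n r + 1) := by
  induction fuel with
  | zero =>
    intro n r hr0 hrr hf
    have hrge : n ≤ r := by omega
    refine ⟨hr0, hrr, ?_⟩
    simp only [pvIsqrtLoop]
    nlinarith
  | succ fuel ih =>
    intro n r hr0 hrr hf
    by_cases h : (r + 1) * (r + 1) ≤ n
    · have hstep : pvIsqrtLoop (fuel + 1) n r = pvIsqrtLoop fuel n (r + 1) := by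
        simp only [pvIsqrtLoop, if_pos h]
      rw [hstep]
      refine ih n (r + 1) (by omega) h (by omega)
    · have hstep : pvIsqrtLoop (fuel + 1) n r = r := by
        simp only [pvIsqrtLoop, if_neg h]
      rw [hstep]
      exact ⟨hr0, hrr, by omega⟩

-- B's loop body as a mapped summand
lemma pv_b_loop (n rr : Int) :
    (PySem.List.pyRange 1 (rr + 1) 1).foldl
      (fun total i =>
        total + (i * PySem.Int.floordiv n i +
          PySem.Int.floordiv (PySem.Int.floordiv n i * (PySem.Int.floordiv n i + 1)) 2)) 0
    = ((PySem.List.pyRange 1 (rr + 1) 1).map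
        (fun i => i * PySem.Int.floordiv n i +
          PySem.Int.floordiv (PySem.Int.floordiv n i * (PySem.Int.floordiv n i + 1)) 2)).sum := by
  rw [PySem.List.foldl_add]
  ring

lemma pv_b_sum_cast (m rn : Nat) :
    ((PySem.List.pyRange 1 ((rn : Int) + 1) 1).map
        (fun i => i * PySem.Int.floordiv (m : Int) i +
          PySem.Int.floordiv (PySem.Int.floordiv (m : Int) i * (PySem.Int.floordiv (m : Int) i + 1)) 2)).sum
      = ((∑ i ∈ Finset.Ioc 0 rn, (i * (m / i) + ∑ d ∈ Finset.Ioc 0 (m / i), d) : Nat) : Int) := by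
  rw [PySem.List.pyRange_one, List.map_map]
  have hm : (((rn : Int) + 1 - 1).toNat) = rn := by omega
  rw [hm, pv_list_range_sum]
  have hterm : ∀ j ∈ Finset.range rn,
      ((fun i => i * PySem.Int.floordiv (m : Int) i +
          PySem.Int.floordiv (PySem.Int.floordiv (m : Int) i * (PySem.Int.floordiv (m : Int) i + 1)) 2)
        ∘ fun k : Nat => 1 + (k : Int)) j
      = ((((j + 1) * (m / (j + 1)) + ∑ d ∈ Finset.Ioc 0 (m / (j + 1)), d) : Nat) : Int) := by
    intro j _
    have h1 : (1 : Int) + (j : Int) = (((j + 1 : Nat)) : Int) := by push_cast; ring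
    simp only [Function.comp]
    rw [h1, pv_fd_nat, pv_fd_tri (m / (j + 1))]
    push_cast
    ring
  rw [Finset.sum_congr rfl hterm, ← Nat.cast_sum]
  exact_mod_cast congrArg (fun x : Nat => (x : Int))
    (pv_range_Ioc (fun i => i * (m / i) + ∑ d ∈ Finset.Ioc 0 (m / i), d) rn)

-- ===== VERDICT (by name: the statement is the Claim_ definition above) =====
theorem grouped_sum_linear_times_floor_py_spec : Claim_equal_grouped_sum_linear_times_floor_py := by
  intro n _
  unfold Spec_grouped_sum_linear_times_floor_py grouped_sum_linear_times_floor_py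
  by_cases hn : n ≤ 0
  · rw [if_pos hn]
    have hB : grouped_sum_linear_times_floor_py_alt n
        = ((PySem.List.pyRange 1 (pvIsqrtLoop n.toNat n 0 + 1) 1).foldl
            (fun total i =>
              total + (i * PySem.Int.floordiv n i +
                PySem.Int.floordiv (PySem.Int.floordiv n i * (PySem.Int.floordiv n i + 1)) 2)) 0)
          - PySem.Int.floordiv (pvIsqrtLoop n.toNat n 0 * (pvIsqrtLoop n.toNat n 0 + 1)) 2
              * pvIsqrtLoop n.toNat n 0 := rfl
    have h0 : n.toNat = 0 := by omega
    rw [hB, h0]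
    simp only [pvIsqrtLoop]
    rw [PySem.List.pyRange_one_eq_nil (by norm_num)]
    simp
  · rw [if_neg hn]
    obtain ⟨m, rfl⟩ : ∃ m : Nat, n = (m : Int) := ⟨n.toNat, by omega⟩
    have hmpos : 0 < m := by omega
    obtain ⟨hr0, hrr, hrlt⟩ := pv_isqrt ((m : Int)).toNat (m : Int) 0 (le_refl 0) (by simp) (by omega)
    obtain ⟨rn, hrn⟩ : ∃ rn : Nat, pvIsqrtLoop ((m : Int)).toNat (m : Int) 0 = (rn : Int) :=
      ⟨(pvIsqrtLoop ((m : Int)).toNat (m : Int) 0).toNat, by omega⟩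
    rw [hrn] at hrr hrlt
    have hB : grouped_sum_linear_times_floor_py_alt (m : Int)
        = ((PySem.List.pyRange 1 (pvIsqrtLoop ((m : Int)).toNat (m : Int) 0 + 1) 1).foldl
            (fun total i =>
              total + (i * PySem.Int.floordiv (m : Int) i +
                PySem.Int.floordiv (PySem.Int.floordiv (m : Int) i * (PySem.Int.floordiv (m : Int) i + 1)) 2)) 0)
          - PySem.Int.floordiv (pvIsqrtLoop ((m : Int)).toNat (m : Int) 0 * (pvIsqrtLoop ((m : Int)).toNat (m : Int) 0 + 1)) 2
              * pvIsqrtLoop ((m : Int)).toNat (m : Int) 0 := rfl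
    rw [hrn] at hB
    rw [hB, pv_b_loop, pv_b_sum_cast m rn]
    -- A's value: the linear sum
    rw [pv_aloop_eq ((m : Int)).toNat (m : Int) 1 0 (by omega) (le_refl 1) (by omega),
        pv_linear_cast m]
    -- cast the minus term
    have htri : PySem.Int.floordiv ((rn : Int) * ((rn : Int) + 1)) 2 * (rn : Int)
        = ((((∑ d ∈ Finset.Ioc 0 rn, d) * rn : Nat)) : Int) := by
      rw [pv_fd_tri rn]; push_cast; ring
    rw [htri]
    -- the hyperbola identity, transported to Nat
    have h1 : rn * rn ≤ m := by exact_mod_cast hrr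
    have h2 : m < (rn + 1) * (rn + 1) := by exact_mod_cast hrlt
    have hmain := pv_main m rn hmpos h1 h2
    have hsplit : (∑ i ∈ Finset.Ioc 0 rn, (i * (m / i) + ∑ d ∈ Finset.Ioc 0 (m / i), d))
        = (∑ i ∈ Finset.Ioc 0 rn, i * (m / i))
          + ∑ i ∈ Finset.Ioc 0 rn, (∑ d ∈ Finset.Ioc 0 (m / i), d) :=
      Finset.sum_add_distrib
    have hS : (∑ d ∈ Finset.Ioc 0 m, d * (m / d)) + (∑ d ∈ Finset.Ioc 0 rn, d) * rn
        = ∑ i ∈ Finset.Ioc 0 rn, (i * (m / i) + ∑ d ∈ Finset.Ioc 0 (m / i), d) := by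
      rw [hsplit, ← hmain, Nat.mul_comm]
    rw [← hS]
    push_cast
    ring
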